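-- pv_equiv track=rewrite | github.com/pypi-data/pypi-mirror-383 | packages/pyolive/pyolive-2.1.3-py3-none-any.whl/pyolive/filter.py | _pattern_split
-- ===== SOURCE A (Python) =====
-- def _pattern_split(string):
--     result = []  # Final list to hold split parts
--     part = []  # Temporary list to accumulate characters of the current part
--     flag = 0
--
--     for char in string:
--         if char == ',' and flag == 0:  # If we hit the delimiter, append the current part to the result
--             if part:  # Avoid appending empty parts caused by consecutive delimiters
--                 result.append(''.join(part))
--                 part = []  # Reset for the next part
--         elif char == '{':  # for include pattern curly brace
--             part.append(char)  # Add the character to the current part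
--             flag = 1
--         elif char == '}':
--             part.append(char)  # Add the character to the current part
--             flag = 0
--         else:
--             part.append(char)  # Add the character to the current part
--
--     # Append the final part after the loop, if any
--     if part:
--         result.append(''.join(part))
--
--     return result
-- ===== SOURCE B (Python) =====
-- def _pattern_split(string):
--     # Split on all commas first, then merge back the pieces whose trailing
--     # comma was inside curly braces, tracked by a flat (non-nesting) flag.
--     result = []
--     acc = []
--     flag = 0
--     for piece in string.split(','):
--         acc.append(piece)
--         for ch in piece:
--             if ch == '{':
--                 flag = 1
--             elif ch == '}':
--                 flag = 0
--         if flag == 0: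
--             joined = ','.join(acc)
--             if joined:
--                 result.append(joined)
--             acc = []
--     if acc:
--         joined = ','.join(acc)
--         if joined:
--             result.append(joined)
--     return result
-- ===== Notes on version B (the rewrite author's own statement) =====
-- stated objective: alternative
-- what changed: Replaces A's character-by-character state machine with split-on-all-commas followed by a merge pass that re-joins pieces whose separating comma fell inside curly braces (brace flag rescanned per piece).
import Mathlib
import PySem

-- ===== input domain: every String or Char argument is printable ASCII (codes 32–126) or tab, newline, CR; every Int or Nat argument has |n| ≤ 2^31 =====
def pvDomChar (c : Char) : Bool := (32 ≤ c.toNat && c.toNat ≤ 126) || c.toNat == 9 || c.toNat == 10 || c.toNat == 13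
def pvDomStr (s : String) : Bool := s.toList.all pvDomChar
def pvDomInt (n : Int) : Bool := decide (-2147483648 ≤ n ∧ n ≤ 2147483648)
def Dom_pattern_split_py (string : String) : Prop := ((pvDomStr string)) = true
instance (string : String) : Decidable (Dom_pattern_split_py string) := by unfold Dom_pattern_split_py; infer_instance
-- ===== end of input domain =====

-- B replaces A's char-level state machine by split-on-commas then merging the pieces whose
-- separating comma lay inside curly braces (objective: alternative decomposition, same cost).

-- ===== PORT A =====
-- one loop iteration of A: (result, part, flag) updated by one character
def pvStepA (st : List String × List Char × Int) (char : Char) : List String × List Char × Int :=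
  match st with
  | (result, part, flag) =>
    if char = ',' ∧ flag = 0 then
      if part ≠ [] then (result ++ [String.ofList part], [], flag) else (result, part, flag)
    else if char = '{' then (result, part ++ [char], 1)
    else if char = '}' then (result, part ++ [char], 0)
    else (result, part ++ [char], flag)

-- A's trailing 'if part: result.append(...)'
def pvFinA (st : List String × List Char × Int) : List String :=
  match st with
  | (result, part, _) => if part ≠ [] then result ++ [String.ofList part] else result

def pattern_split_py (string : String) : List String :=
  pvFinA (string.toList.foldl pvStepA ([], [], 0))

-- ===== PORT B =====
-- B's inner 'for ch in piece' flag scan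
def pvFlagOf (flag : Int) (piece : List Char) : Int :=
  piece.foldl (fun f ch => if ch = '{' then 1 else if ch = '}' then 0 else f) flag

-- B's 'joined = ','.join(acc); if joined: result.append(joined)'
def pvEmit (result : List String) (acc : List (List Char)) : List String :=
  let joined := PySem.Chars.join [','] acc
  if joined ≠ [] then result ++ [String.ofList joined] else result

-- one loop iteration of B: append the piece, rescan the flag, emit at a real boundary
def pvStepB (st : List String × List (List Char) × Int) (piece : List Char) :
    List String × List (List Char) × Int :=
  match st with
  | (result, acc, flag) =>
    let acc' := acc ++ [piece]
    let flag' := pvFlagOf flag piece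
    if flag' = 0 then (pvEmit result acc', [], flag')
    else (result, acc', flag')

def pattern_split_py_alt (string : String) : List String :=
  match (List.splitOn ',' string.toList).foldl pvStepB ([], [], 0) with
  | (result, acc, _) => if acc ≠ [] then pvEmit result acc else result

-- ===== PRECONDITION & SPEC =====
def Spec_pattern_split_py (string : String) (out : List String) : Prop := out = pattern_split_py_alt string
instance (string : String) (out : List String) : Decidable (Spec_pattern_split_py string out) := by unfold Spec_pattern_split_py; infer_instance

-- ===== CLAIM (what is proved, stated in full; the proofs are below) =====
def Claim_equal_pattern_split_py : Prop := ∀ (string : String), Dom_pattern_split_py string → Spec_pattern_split_py string (pattern_split_py string)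

-- ===== LEMMAS AND PROOFS =====

-- the characters A has accumulated when B's accumulator holds 'acc' and the following comma was consumed
def pvFlat (acc : List (List Char)) : List Char := acc.flatMap (· ++ [','])

theorem pvFlat_append (acc : List (List Char)) (p : List Char) :
    pvFlat (acc ++ [p]) = pvFlat acc ++ p ++ [','] := by
  simp [pvFlat]

theorem pvJoin_eq (acc : List (List Char)) (p : List Char) :
    PySem.Chars.join [','] (acc ++ [p]) = pvFlat acc ++ p := by
  induction acc with
  | nil => simp [PySem.Chars.join, pvFlat, List.intercalate]
  | cons a as ih =>
    rcases hh : as ++ [p] with _ | ⟨b, bs⟩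
    · exact absurd hh (by simp)
    · have hcons : (a :: as) ++ [p] = a :: b :: bs := by rw [List.cons_append, hh]
      have hstep : List.intercalate [','] (a :: b :: bs) =
          a ++ [','] ++ List.intercalate [','] (b :: bs) := by
        simp [List.intercalate, List.intersperse]
      rw [hh] at ih
      rw [hcons]
      simp only [PySem.Chars.join] at ih ⊢
      rw [hstep, ih, pvFlat]
      simp [pvFlat]

-- members of splitOn ',' are comma-free
theorem pv_splitOnP_not_mem (cs : List Char) :
    ∀ p ∈ List.splitOnP (fun c => c == ',') cs, ',' ∉ p := by
  induction cs with
  | nil =>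
    intro p hp
    simp [List.splitOnP_nil] at hp
    simp [hp]
  | cons c t ih =>
    intro p hp
    rw [List.splitOnP_cons] at hp
    by_cases hc : c = ','
    · simp [hc] at hp
      rcases hp with hp | hp
      · simp [hp]
      · exact ih p hp
    · simp [hc] at hp
      rcases hq : List.splitOnP (fun c => c == ',') t with _ | ⟨q, qs⟩
      · exact absurd hq (List.splitOnP_ne_nil _ t)
      · rw [hq] at hp
        simp at hp
        rcases hp with hp | hp
        · intro hm
          rw [hp] at hm
          rcases List.mem_cons.mp hm with h1 | h1
          · exact hc h1.symm
          · exact ih q (by rw [hq]; exact List.mem_cons_self) h1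
        · exact ih p (by rw [hq]; exact List.mem_cons.mpr (Or.inr hp))

theorem pv_splitOn_not_mem (cs : List Char) : ∀ p ∈ List.splitOn ',' cs, ',' ∉ p := by
  simpa [List.splitOn] using pv_splitOnP_not_mem cs

-- A's fold over a comma-free piece: no boundary fires, characters accumulate, flag rescanned
theorem pvFoldA_piece (piece : List Char) (hpc : ',' ∉ piece) :
    ∀ (r : List String) (p : List Char) (f : Int),
      piece.foldl pvStepA (r, p, f) = (r, p ++ piece, pvFlagOf f piece) := by
  induction piece with
  | nil => intro r p f; simp [pvFlagOf]
  | cons c cs ih =>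
    intro r p f
    have hc : c ≠ ',' := fun h => hpc (h ▸ List.mem_cons_self)
    have hcs : ',' ∉ cs := fun h => hpc (List.mem_cons.mpr (Or.inr h))
    by_cases h1 : c = '{'
    · simp only [List.foldl_cons, pvStepA, h1]
      rw [ih hcs]
      simp [pvFlagOf]
    · by_cases h2 : c = '}'
      · simp only [List.foldl_cons, pvStepA]
        rw [if_neg (by simp [hc]), if_neg h1, if_pos h2, ih hcs]
        simp [pvFlagOf, h2]
      · simp only [List.foldl_cons, pvStepA]
        rw [if_neg (by simp [hc]), if_neg h1, if_neg h2, ih hcs]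
        simp [pvFlagOf, h1, h2]

-- main simulation: A over the interleaved characters = B over the pieces, from matching states
theorem pv_main (rest : List (List Char)) :
    ∀ (piece : List Char) (r : List String) (acc : List (List Char)) (f : Int),
      ',' ∉ piece → (∀ q ∈ rest, ',' ∉ q) →
      pvFinA ((List.intercalate [','] (piece :: rest)).foldl pvStepA (r, pvFlat acc, f)) =
        (match (piece :: rest).foldl pvStepB (r, acc, f) with
         | (result, acc', _) => if acc' ≠ [] then pvEmit result acc' else result) := by
  induction rest with
  | nil =>
    intro piece r acc f hpc _
    have hint : List.intercalate [','] [piece] = piece := by simp [List.intercalate]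
    rw [hint, pvFoldA_piece piece hpc]
    simp only [List.foldl_cons, List.foldl_nil, pvStepB]
    by_cases hf : pvFlagOf f piece = 0
    · simp only [hf]
      simp [pvFinA, pvEmit, pvJoin_eq, pvFlat]
    · simp only [if_neg hf]
      have hne : acc ++ [piece] ≠ [] := by simp
      simp [pvFinA, pvEmit, pvJoin_eq, hne, pvFlat]
  | cons q qs ih =>
    intro piece r acc f hpc hrest
    have hq : ',' ∉ q := hrest q List.mem_cons_self
    have hqs : ∀ x ∈ qs, ',' ∉ x := fun x hx => hrest x (List.mem_cons.mpr (Or.inr hx))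
    have hint : List.intercalate [','] (piece :: q :: qs) =
        piece ++ [','] ++ List.intercalate [','] (q :: qs) := by
      simp [List.intercalate, List.intersperse]
    rw [hint, List.foldl_append, List.foldl_append, pvFoldA_piece piece hpc]
    simp only [List.foldl_cons, List.foldl_nil]
    by_cases hf : pvFlagOf f piece = 0
    · have hA : pvStepA (r, pvFlat acc ++ piece, pvFlagOf f piece) ',' =
          (pvEmit r (acc ++ [piece]), [], (0 : Int)) := by
        simp only [pvStepA, hf]
        split_ifs with h1 h2 <;> simp_all [pvEmit, pvJoin_eq]
      have hB : pvStepB (r, acc, f) piece = (pvEmit r (acc ++ [piece]), [], (0 : Int)) := by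
        simp [pvStepB, hf]
      have hIH := ih q (pvEmit r (acc ++ [piece])) [] 0 hq hqs
      simp only [pvFlat, List.flatMap_nil] at hIH
      rw [hA, hIH, hB]
      simp only [List.foldl_cons]
    · have hA : pvStepA (r, pvFlat acc ++ piece, pvFlagOf f piece) ',' =
          (r, pvFlat (acc ++ [piece]), pvFlagOf f piece) := by
        simp only [pvStepA]
        rw [if_neg (by simp [hf]), if_neg (by decide), if_neg (by decide), pvFlat_append]
      have hB : pvStepB (r, acc, f) piece = (r, acc ++ [piece], pvFlagOf f piece) := by
        simp [pvStepB, hf]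
      have hIH := ih q r (acc ++ [piece]) (pvFlagOf f piece) hq hqs
      rw [hA, hIH, hB]
      simp only [List.foldl_cons]

-- ===== VERDICT (by name: the statement is the Claim_ definition above) =====
theorem pattern_split_py_spec : Claim_equal_pattern_split_py := by
  intro string _
  unfold Spec_pattern_split_py pattern_split_py pattern_split_py_alt
  rcases hs : List.splitOn ',' string.toList with _ | ⟨p, ps⟩
  · exact absurd hs (by simp [List.splitOn]; exact List.splitOnP_ne_nil _ _)
  · have hchars : string.toList = List.intercalate [','] (p :: ps) := by
      rw [← hs]; exact (List.intercalate_splitOn string.toList ',').symm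
    have hfree : ∀ q ∈ p :: ps, ',' ∉ q := by
      rw [← hs]; exact pv_splitOn_not_mem string.toList
    rw [hchars]
    have := pv_main ps p [] [] 0 (hfree p List.mem_cons_self)
      (fun q hq => hfree q (List.mem_cons.mpr (Or.inr hq)))
    simpa [pvFlat] using this
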